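-- pv_equiv track=rewrite | github.com/pypi-data/pypi-mirror-25 | packages/solfmt/solfmt-0.0.2.tar.gz/solfmt-0.0.2/app.py | fix_indent
-- ===== SOURCE A (Python) =====
-- def fix_indent(lines):
--     open_brackets = 0
--     closed_brackets = 0
--     indent = 0
--     tranformed_lines = []
--     for line in lines:
--         line = line.strip(' \t')
--         if not line:
--             tranformed_lines.append('')
--             continue
--         if '}' in line and '{' not in line:
--             indent -= 1
--         line = '    ' * indent + line if indent else line
--         tranformed_lines.append(line)
--         open_brackets += 1 if '{' in line else 0
--         closed_brackets += 1 if '}' in line else 0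
--         indent = open_brackets - closed_brackets
--     return tranformed_lines
-- ===== SOURCE B (Python) =====
-- def fix_indent(lines):
--     # Divide and conquer: the nesting level is a prefix sum of per-line brace
--     # deltas, and prefix sums split additively, so a segment can be rendered
--     # from its entry level alone; no running state is threaded line by line.
--     stripped = [line.strip(' \t') for line in lines]
--
--     def render(lo, hi, level):
--         if hi - lo == 1:
--             s = stripped[lo]
--             if not s:
--                 return ['']
--             ind = level - ('}' in s and '{' not in s)
--             return ['    ' * ind + s if ind else s]
--         if hi <= lo:
--             return []
--         mid = (lo + hi) // 2
--         left = stripped[lo:mid]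
--         delta = sum('{' in s for s in left) - sum('}' in s for s in left)
--         return render(lo, mid, level) + render(mid, hi, level + delta)
--
--     return render(0, len(stripped), 0)
-- ===== Notes on version B (the rewrite author's own statement) =====
-- stated objective: alternative
-- what changed: A's single stateful loop threading open/closed counters and an indent variable line by line is replaced by a divide-and-conquer renderer: since the nesting level is a prefix sum of per-line brace deltas and prefix sums split additively, each half of the line list is rendered independently from its entry level (the left half's delta computed by a sum), with no state carried across lines.
import Mathlib
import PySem

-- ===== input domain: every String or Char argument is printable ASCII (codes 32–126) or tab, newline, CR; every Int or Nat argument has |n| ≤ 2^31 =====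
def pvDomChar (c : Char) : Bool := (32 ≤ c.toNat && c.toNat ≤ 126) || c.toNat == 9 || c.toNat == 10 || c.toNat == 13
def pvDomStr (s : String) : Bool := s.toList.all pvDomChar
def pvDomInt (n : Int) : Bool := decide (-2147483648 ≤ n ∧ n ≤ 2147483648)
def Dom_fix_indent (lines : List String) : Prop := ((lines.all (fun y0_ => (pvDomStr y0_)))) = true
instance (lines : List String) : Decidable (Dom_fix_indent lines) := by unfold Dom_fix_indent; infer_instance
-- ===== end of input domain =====

-- B replaces A's stateful line-by-line loop by a divide-and-conquer renderer exploiting that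
-- the nesting level is an additively-splitting prefix sum; alternative algorithm, not faster.

-- ===== PORT A =====
-- hand port of Python's "'    ' * n + s" (string repetition; n ≤ 0 yields '' — Int.toNat clamps
-- negatives to 0, which is exactly CPython's behaviour for str * int); exact for every Int n
def pvIndentStr (n : Int) (s : String) : String :=
  String.ofList (List.flatten (List.replicate n.toNat "    ".toList) ++ s.toList)

-- one iteration of A's loop over (open_brackets, closed_brackets, indent, tranformed_lines)
def fix_indent_step (st : Int × Int × Int × List String) (line : String) :
    Int × Int × Int × List String :=
  let ob := st.1
  let cb := st.2.1
  let indent := st.2.2.1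
  let acc := st.2.2.2
  let line := PySem.Str.stripChars line " \t"
  if line = "" then (ob, cb, indent, acc ++ [""])
  else
    let indent := if PySem.Str.isIn "}" line && !PySem.Str.isIn "{" line then indent - 1 else indent
    let line := if indent ≠ 0 then pvIndentStr indent line else line
    let acc := acc ++ [line]
    let ob := ob + (if PySem.Str.isIn "{" line then 1 else 0)
    let cb := cb + (if PySem.Str.isIn "}" line then 1 else 0)
    (ob, cb, ob - cb, acc)

def fix_indent (lines : List String) : List String :=
  (lines.foldl fix_indent_step (0, 0, 0, ([] : List String))).2.2.2

-- ===== PORT B =====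
-- B's recursive helper render(lo, hi, level) over the shared stripped list; the stripped[lo]
-- access is in range in every call B makes, ported with pyGetD (default never used)
def fix_indent_alt_render (stripped : List String) (lo hi level : Int) : List String :=
  if hi - lo = 1 then
    let s := PySem.List.pyGetD stripped lo ""
    if s = "" then [""]
    else
      let ind := level - (if PySem.Str.isIn "}" s && !PySem.Str.isIn "{" s then 1 else 0)
      [if ind ≠ 0 then pvIndentStr ind s else s]
  else if hi ≤ lo then []
  else
    let mid := PySem.Int.floordiv (lo + hi) 2
    let left := PySem.List.slice stripped (some lo) (some mid)
    let delta := (left.map (fun s => if PySem.Str.isIn "{" s then (1 : Int) else 0)).sum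
      - (left.map (fun s => if PySem.Str.isIn "}" s then (1 : Int) else 0)).sum
    fix_indent_alt_render stripped lo mid level
      ++ fix_indent_alt_render stripped mid hi (level + delta)
termination_by (hi - lo).toNat
decreasing_by
  · have h2 : PySem.Int.floordiv (lo + hi) 2 = (lo + hi) / 2 := by
      simp [PySem.Int.floordiv, Int.fdiv_eq_ediv]
    omega
  · have h2 : PySem.Int.floordiv (lo + hi) 2 = (lo + hi) / 2 := by
      simp [PySem.Int.floordiv, Int.fdiv_eq_ediv]
    omega

def fix_indent_alt (lines : List String) : List String :=
  let stripped := lines.map (fun line => PySem.Str.stripChars line " \t")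
  fix_indent_alt_render stripped 0 (stripped.length : Int) 0

-- ===== PRECONDITION & SPEC =====
def Spec_fix_indent (lines : List String) (out : List String) : Prop := out = fix_indent_alt lines
instance (lines : List String) (out : List String) : Decidable (Spec_fix_indent lines out) := by unfold Spec_fix_indent; infer_instance

-- ===== CLAIM (what is proved, stated in full; the proofs are below) =====
def Claim_equal_fix_indent : Prop := ∀ (lines : List String), Dom_fix_indent lines → Spec_fix_indent lines (fix_indent lines)

-- ===== LEMMAS AND PROOFS =====

-- reference recursion over already-stripped lines, carrying the current level
def pvGo : List String → Int → List String
  | [], _ => []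
  | s :: ss, L =>
    if s = "" then "" :: pvGo ss L
    else
      let o := PySem.Str.isIn "{" s
      let c := PySem.Str.isIn "}" s
      let ind := if c && !o then L - 1 else L
      (if ind ≠ 0 then pvIndentStr ind s else s) ::
        pvGo ss (L + (if o then 1 else 0) - (if c then 1 else 0))

theorem isIn_pvIndentStr (t : String) (ht : t = "{" ∨ t = "}") (n : Int) (s : String) :
    PySem.Str.isIn t (pvIndentStr n s) = PySem.Str.isIn t s := by
  have hsp : ∀ x ∈ List.flatten (List.replicate n.toNat "    ".toList), x = ' ' := by
    intro x hx
    rcases List.mem_flatten.mp hx with ⟨l, hl, hxl⟩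
    rw [List.eq_of_mem_replicate hl] at hxl
    have : "    ".toList = [' ', ' ', ' ', ' '] := by decide
    rw [this] at hxl; simpa using hxl
  have h1 : PySem.Str.isIn t (pvIndentStr n s) = true ↔ PySem.Str.isIn t s = true := by
    rw [PySem.Str.isIn_iff_infix, PySem.Str.isIn_iff_infix]
    have hpl : (pvIndentStr n s).toList
        = List.flatten (List.replicate n.toNat "    ".toList) ++ s.toList := by
      simp [pvIndentStr]
    rw [hpl]
    have htl : ∃ c : Char, c ≠ ' ' ∧ t.toList = [c] := by
      rcases ht with h | h <;> subst h
      · exact ⟨'{', by decide, by decide⟩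
      · exact ⟨'}', by decide, by decide⟩
    rcases htl with ⟨c, hc, hct⟩
    rw [hct, List.singleton_infix_iff, List.singleton_infix_iff, List.mem_append]
    constructor
    · rintro (h | h)
      · exact absurd (hsp c h) hc
      · exact h
    · exact Or.inr
  exact (Bool.eq_iff_iff).mpr h1

theorem foldA_eq (ls : List String) : ∀ (ob cb : Int) (acc : List String),
    (ls.foldl fix_indent_step (ob, cb, ob - cb, acc)).2.2.2
      = acc ++ pvGo (ls.map (fun l => PySem.Str.stripChars l " \t")) (ob - cb) := by
  induction ls with
  | nil => intro ob cb acc; simp [pvGo]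
  | cons hd tl ih =>
    intro ob cb acc
    rw [List.foldl_cons, List.map_cons]
    by_cases hb : PySem.Str.stripChars hd " \t" = ""
    · rw [show fix_indent_step (ob, cb, ob - cb, acc) hd = (ob, cb, ob - cb, acc ++ [""]) by
        simp [fix_indent_step, hb]]
      rw [ih ob cb (acc ++ [""])]
      simp [pvGo, hb]
    · set s := PySem.Str.stripChars hd " \t" with hs
      set o := PySem.Str.isIn "{" s with hoo
      set c := PySem.Str.isIn "}" s with hcc
      set ind : Int := if c && !o then ob - cb - 1 else ob - cb with hind
      set line : String := if ind ≠ 0 then pvIndentStr ind s else s with hline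
      have ho : PySem.Str.isIn "{" line = o := by
        rw [hline]; split
        · rw [isIn_pvIndentStr "{" (Or.inl rfl)]
        · exact hoo.symm
      have hc2 : PySem.Str.isIn "}" line = c := by
        rw [hline]; split
        · rw [isIn_pvIndentStr "}" (Or.inr rfl)]
        · exact hcc.symm
      have hstep : fix_indent_step (ob, cb, ob - cb, acc) hd
          = (ob + (if o then 1 else 0), cb + (if c then 1 else 0),
             (ob + (if o then 1 else 0)) - (cb + (if c then 1 else 0)), acc ++ [line]) := by
        simp only [fix_indent_step, ← hs, hb, ho, hc2, ← hoo, ← hcc, ← hind, ← hline]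
        simp
      rw [hstep, ih (ob + (if o then 1 else 0)) (cb + (if c then 1 else 0)) (acc ++ [line])]
      have hL : (ob + (if o then 1 else 0)) - (cb + (if c then 1 else 0))
          = ob - cb + (if o then 1 else 0) - (if c then 1 else 0) := by omega
      rw [hL]
      have hgo : pvGo (s :: tl.map (fun l => PySem.Str.stripChars l " \t")) (ob - cb)
          = line :: pvGo (tl.map (fun l => PySem.Str.stripChars l " \t"))
              (ob - cb + (if o then 1 else 0) - (if c then 1 else 0)) := by
        simp only [pvGo, if_neg hb, ← hoo, ← hcc, ← hind, ← hline]
      rw [hgo]; simp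

-- per-line brace delta, summed over a segment
def pvDelta (xs : List String) : Int :=
  (xs.countP (fun t => PySem.Str.isIn "{" t) : Int)
    - (xs.countP (fun t => PySem.Str.isIn "}" t) : Int)

theorem pvGo_append (xs : List String) : ∀ (ys : List String) (L : Int),
    pvGo (xs ++ ys) L = pvGo xs L ++ pvGo ys (L + pvDelta xs) := by
  induction xs with
  | nil => intro ys L; simp [pvGo, pvDelta]
  | cons s tl ih =>
    intro ys L
    by_cases hb : s = ""
    · subst hb
      have hd : pvDelta ("" :: tl) = pvDelta tl := by
        simp [pvDelta, List.countP_cons]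
      simp [pvGo, ih, hd]
    · have hd : pvDelta (s :: tl)
          = (if PySem.Str.isIn "{" s then (1 : Int) else 0)
            - (if PySem.Str.isIn "}" s then (1 : Int) else 0) + pvDelta tl := by
        simp only [pvDelta, List.countP_cons]
        split <;> split <;> push_cast <;> omega
      simp only [List.cons_append, pvGo, if_neg hb, ih, hd, List.cons_inj_right]
      congr 2
      omega

theorem renderEq (stripped : List String) : ∀ (n : Nat) (lo hi level : Int),
    (hi - lo).toNat = n → 0 ≤ lo → 0 ≤ hi → hi ≤ (stripped.length : Int) →
    fix_indent_alt_render stripped lo hi level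
      = pvGo (PySem.List.slice stripped (some lo) (some hi)) level := by
  intro n
  induction n using Nat.strong_induction_on with
  | _ n ih =>
    intro lo hi level hn hlo h0hi hhi
    rw [fix_indent_alt_render]
    by_cases h1 : hi - lo = 1
    · rw [if_pos h1]
      have hlt : lo.toNat < stripped.length := by omega
      have hsl : PySem.List.slice stripped (some lo) (some hi)
          = [stripped[lo.toNat]] := by
        rw [PySem.List.slice_toNat _ hlo (by omega)]
        have ht : hi.toNat - lo.toNat = 1 := by omega
        rw [ht, List.take_one, List.head?_drop]
        simp [List.getElem?_eq_getElem hlt]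
      have hget : PySem.List.pyGetD stripped lo "" = stripped[lo.toNat] := by
        rw [show PySem.List.pyGetD stripped lo ""
            = PySem.List.pyGetD stripped ((lo.toNat : Nat) : Int) "" from by congr 1; omega,
          PySem.List.pyGetD_natCast]
        simp [List.getD, List.getElem?_eq_getElem hlt]
      rw [hsl, hget]
      set s := stripped[lo.toNat]
      by_cases hb : s = ""
      · simp [pvGo, hb]
      · simp only [pvGo, hb, if_false]
        by_cases hco : PySem.Chars.isIn ['}'] s.toList = true ∧ PySem.Chars.isIn ['{'] s.toList = false
        · simp [PySem.Str.isIn, hco]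
        · simp [PySem.Str.isIn, hco]
    · rw [if_neg h1]
      by_cases hle : hi ≤ lo
      · rw [if_pos hle]
        have he : PySem.List.slice stripped (some lo) (some hi) = [] := by
          rw [PySem.List.slice_toNat _ hlo h0hi]
          have h0 : hi.toNat - lo.toNat = 0 := by omega
          simp [h0]
        rw [he, pvGo]
      · rw [if_neg hle]
        have hmid : PySem.Int.floordiv (lo + hi) 2 = (lo + hi) / 2 := by
          simp [PySem.Int.floordiv, Int.fdiv_eq_ediv]
        set mid := PySem.Int.floordiv (lo + hi) 2 with hm
        have hb1 : lo < mid := by omega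
        have hb2 : mid < hi := by omega
        have hl : fix_indent_alt_render stripped lo mid level
            = pvGo (PySem.List.slice stripped (some lo) (some mid)) level :=
          ih (mid - lo).toNat (by omega) lo mid level rfl hlo (by omega) (by omega)
        have hsplit : PySem.List.slice stripped (some lo) (some hi)
            = PySem.List.slice stripped (some lo) (some mid)
              ++ PySem.List.slice stripped (some mid) (some hi) := by
          rw [PySem.List.slice_toNat _ hlo h0hi,
            PySem.List.slice_toNat _ hlo (by omega),
            PySem.List.slice_toNat _ (by omega) h0hi]
          have hadd : hi.toNat - lo.toNat
              = (mid.toNat - lo.toNat) + (hi.toNat - mid.toNat) := by omega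
          rw [hadd, List.take_add]
          congr 1
          rw [List.drop_drop]
          congr 2
          omega
        have hdelta :
            (((PySem.List.slice stripped (some lo) (some mid)).map
                (fun s => if PySem.Str.isIn "{" s then (1 : Int) else 0)).sum
              - ((PySem.List.slice stripped (some lo) (some mid)).map
                (fun s => if PySem.Str.isIn "}" s then (1 : Int) else 0)).sum)
            = pvDelta (PySem.List.slice stripped (some lo) (some mid)) := by
          simp only [pvDelta, PySem.List.sum_map_ite_one_zero]
        have hr : fix_indent_alt_render stripped mid hi
              (level + pvDelta (PySem.List.slice stripped (some lo) (some mid)))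
            = pvGo (PySem.List.slice stripped (some mid) (some hi))
              (level + pvDelta (PySem.List.slice stripped (some lo) (some mid))) :=
          ih (hi - mid).toNat (by omega) mid hi _ rfl (by omega) (by omega) hhi
        show fix_indent_alt_render stripped lo mid level
            ++ fix_indent_alt_render stripped mid hi
              (level + (((PySem.List.slice stripped (some lo) (some mid)).map
                  (fun s => if PySem.Str.isIn "{" s then (1 : Int) else 0)).sum
                - ((PySem.List.slice stripped (some lo) (some mid)).map
                  (fun s => if PySem.Str.isIn "}" s then (1 : Int) else 0)).sum))
          = pvGo (PySem.List.slice stripped (some lo) (some hi)) level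
        rw [hdelta, hl, hr, hsplit, pvGo_append]

-- ===== VERDICT (by name: the statement is the Claim_ definition above) =====
theorem fix_indent_spec : Claim_equal_fix_indent := by
  intro lines _
  show fix_indent lines = fix_indent_alt lines
  rw [fix_indent, fix_indent_alt]
  rw [show ((0 : Int), (0 : Int), (0 : Int), ([] : List String))
      = ((0 : Int), (0 : Int), (0 : Int) - 0, ([] : List String)) by norm_num]
  rw [foldA_eq]
  simp only [List.nil_append]
  set stripped := lines.map (fun l => PySem.Str.stripChars l " \t") with hs
  rw [renderEq stripped (stripped.length : Int).toNat 0 (stripped.length : Int) 0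
      (by omega) (by omega) (by omega) (by omega)]
  congr 1
  rw [show ((0 : Int)) = ((0 : Nat) : Int) by norm_num, PySem.List.slice_natCast]
  simp
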